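-- pv_equiv track=rewrite | github.com/Anri-Lombard/sallm | src/main/sallm/data/formatters/ner.py | reconstruct_entities_from_iob
-- ===== SOURCE A (Python) =====
-- def reconstruct_entities_from_iob(
--     tokens: list[str], ner_tag_ids: list[int], tag_map: list[str]
-- ) -> list[str]:
--     """Reconstruct named entities from IOB-tagged tokens.
--
--     Args:
--         tokens: List of tokens
--         ner_tag_ids: List of tag IDs for each token
--         tag_map: Mapping from tag ID to tag name (e.g., ["O", "B-PER", "I-PER"])
--
--     Returns:
--         List of entity strings in "LABEL: text" format
--     """
--     entities = []
--     current_entity_tokens = []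
--     current_entity_label = None
--
--     for token, tag_id in zip(tokens, ner_tag_ids, strict=False):
--         tag_name = tag_map[tag_id]
--
--         if tag_name.startswith("B-"):
--             if current_entity_tokens:
--                 entity_text = " ".join(current_entity_tokens)
--                 entities.append(f"{current_entity_label}: {entity_text}")
--
--             current_entity_tokens = [token]
--             current_entity_label = tag_name[2:]
--         elif tag_name.startswith("I-"):
--             if current_entity_label == tag_name[2:]:
--                 current_entity_tokens.append(token)
--             else:
--                 if current_entity_tokens:
--                     entity_text = " ".join(current_entity_tokens)
--                     entities.append(f"{current_entity_label}: {entity_text}")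
--                 current_entity_tokens = []
--                 current_entity_label = None
--         else:  # O tag
--             if current_entity_tokens:
--                 entity_text = " ".join(current_entity_tokens)
--                 entities.append(f"{current_entity_label}: {entity_text}")
--             current_entity_tokens = []
--             current_entity_label = None
--
--     if current_entity_tokens:
--         entity_text = " ".join(current_entity_tokens)
--         entities.append(f"{current_entity_label}: {entity_text}")
--
--     return entities
-- ===== SOURCE B (Python) =====
-- def reconstruct_entities_from_iob(
--     tokens: list[str], ner_tag_ids: list[int], tag_map: list[str]
-- ) -> list[str]:
--     """Span-based reconstruction: every emitted entity is a maximal span that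
--     starts at a 'B-' tag and extends over the consecutive matching 'I-' tags,
--     so we jump span-to-span over the tagged pairs instead of keeping
--     open-entity state."""
--     pairs = [(tok, tag_map[tid]) for tok, tid in zip(tokens, ner_tag_ids)]
--     n = len(pairs)
--     entities = []
--     i = 0
--     while i < n:
--         tag = pairs[i][1]
--         if tag.startswith("B-"):
--             label = tag[2:]
--             j = i + 1
--             while j < n and pairs[j][1].startswith("I-") and pairs[j][1][2:] == label:
--                 j += 1
--             entities.append(label + ": " + " ".join(p[0] for p in pairs[i:j]))
--             i = j
--         else:
--             i += 1
--     return entities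
-- ===== Notes on version B (the rewrite author's own statement) =====
-- stated objective: alternative
-- what changed: B abandons A's stateful chunker (entities/current_tokens/current_label carried through one fold) for a span-jumping algorithm: it precomputes the (token, tag) pairs, then repeatedly finds the next 'B-' tag and consumes the maximal run of matching 'I-' tags in one inner scan (takeWhile/dropWhile in the port), emitting each entity from its whole span at once.
-- outside the precondition, e.g. on reconstruct_entities_from_iob(['a'], [3], ['O', 'B-PER']): A raises IndexError, B raises IndexError
import Mathlib
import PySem

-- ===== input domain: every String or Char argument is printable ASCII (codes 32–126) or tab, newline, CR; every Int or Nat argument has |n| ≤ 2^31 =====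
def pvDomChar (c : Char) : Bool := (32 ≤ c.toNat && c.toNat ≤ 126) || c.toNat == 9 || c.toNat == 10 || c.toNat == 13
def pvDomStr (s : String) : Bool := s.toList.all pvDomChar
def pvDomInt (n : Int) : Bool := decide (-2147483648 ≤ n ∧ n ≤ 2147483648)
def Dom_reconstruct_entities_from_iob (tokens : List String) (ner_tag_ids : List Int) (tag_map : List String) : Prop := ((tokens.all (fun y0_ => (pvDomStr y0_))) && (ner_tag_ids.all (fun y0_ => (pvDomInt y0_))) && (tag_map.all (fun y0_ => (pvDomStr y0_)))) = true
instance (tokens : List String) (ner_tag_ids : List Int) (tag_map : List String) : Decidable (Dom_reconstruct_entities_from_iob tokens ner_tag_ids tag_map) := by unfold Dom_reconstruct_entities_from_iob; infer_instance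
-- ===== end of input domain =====

set_option maxHeartbeats 1000000


-- B replaces A's stateful single-pass chunker by a span jumper: every entity is the maximal
-- span starting at a 'B-' tag followed by matching 'I-' tags, found by takeWhile/dropWhile
-- (objective: alternative algorithm, no open-entity state carried across the scan).

-- ===== PORT A =====
-- f"{current_entity_label}: {entity_text}" with the label an Optional[str] (None prints as "None")
def pvFmtA (lbl : Option String) (toks : List String) : String :=
  (match lbl with | some l => l | none => "None") ++ ": " ++ PySem.Str.join " " toks

-- A's loop body once tag_name = tag_map[tag_id] is in hand; state = (entities, current_entity_tokens, current_entity_label)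
def pvBodyA (st : List String × List String × Option String) (tok tag : String) :
    List String × List String × Option String :=
  if PySem.Str.startswith tag "B-" then
    ((if st.2.1 ≠ [] then st.1 ++ [pvFmtA st.2.2 st.2.1] else st.1),
     [tok], some (PySem.Str.slice tag (some 2) none))
  else if PySem.Str.startswith tag "I-" then
    if st.2.2 == some (PySem.Str.slice tag (some 2) none) then
      (st.1, st.2.1 ++ [tok], st.2.2)
    else
      ((if st.2.1 ≠ [] then st.1 ++ [pvFmtA st.2.2 st.2.1] else st.1), [], none)
  else
    ((if st.2.1 ≠ [] then st.1 ++ [pvFmtA st.2.2 st.2.1] else st.1), [], none)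

-- tag_name := tag_map[tag_id]; the none case (IndexError) is excluded by Pre_
def pvStepA (tag_map : List String) (st : List String × List String × Option String)
    (p : String × Int) : List String × List String × Option String :=
  pvBodyA st p.1 ((PySem.List.pyGet? tag_map p.2).getD "")

def reconstruct_entities_from_iob (tokens : List String) (ner_tag_ids : List Int) (tag_map : List String) : List String :=
  let st := (tokens.zip ner_tag_ids).foldl (pvStepA tag_map) ([], [], none)
  if st.2.1 ≠ [] then st.1 ++ [pvFmtA st.2.2 st.2.1] else st.1

-- ===== PORT B =====
-- pairs = [(tok, tag_map[tid]) for tok, tid in zip(tokens, ner_tag_ids)]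
def pvPairsB (tokens : List String) (ner_tag_ids : List Int) (tag_map : List String) :
    List (String × String) :=
  (tokens.zip ner_tag_ids).map (fun p => (p.1, (PySem.List.pyGet? tag_map p.2).getD ""))

-- inner while condition: pairs[j][1].startswith("I-") and pairs[j][1][2:] == label
def pvSpanIB (l : String) (q : String × String) : Bool :=
  PySem.Str.startswith q.2 "I-" && (PySem.Str.slice q.2 (some 2) none == l)

-- outer while over the suffix of pairs: jump span to span
def pvGoB : List (String × String) → List String
  | [] => []
  | q :: rest =>
    if PySem.Str.startswith q.2 "B-" then
      let l := PySem.Str.slice q.2 (some 2) none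
      let body := rest.takeWhile (pvSpanIB l)
      let rest' := rest.dropWhile (pvSpanIB l)
      (l ++ ": " ++ PySem.Str.join " " (q.1 :: body.map Prod.fst)) :: pvGoB rest'
    else pvGoB rest
termination_by qs => qs.length
decreasing_by
  · have := List.length_dropWhile_le (p := pvSpanIB (PySem.Str.slice q.2 (some 2) none)) (l := rest)
    simp; omega
  · simp

def reconstruct_entities_from_iob_alt (tokens : List String) (ner_tag_ids : List Int) (tag_map : List String) : List String :=
  pvGoB (pvPairsB tokens ner_tag_ids tag_map)

-- ===== PRECONDITION & SPEC =====
-- Pre_ excludes exactly the inputs where A raises IndexError: some paired tag id out of range of tag_map.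
def Pre_reconstruct_entities_from_iob (tokens : List String) (ner_tag_ids : List Int) (tag_map : List String) : Prop :=
  ∀ p ∈ tokens.zip ner_tag_ids, (PySem.List.pyGet? tag_map p.2).isSome = true
instance (tokens : List String) (ner_tag_ids : List Int) (tag_map : List String) : Decidable (Pre_reconstruct_entities_from_iob tokens ner_tag_ids tag_map) := by unfold Pre_reconstruct_entities_from_iob; infer_instance

def pvWitness_reconstruct_entities_from_iob : List String × List Int × List String :=
  (["John", "Smith", "went", "to", "Paris"], [1, 2, 0, 0, 3], ["O", "B-PER", "I-PER", "B-LOC"])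

def Spec_reconstruct_entities_from_iob (tokens : List String) (ner_tag_ids : List Int) (tag_map : List String) (out : List String) : Prop := out = reconstruct_entities_from_iob_alt tokens ner_tag_ids tag_map
instance (tokens : List String) (ner_tag_ids : List Int) (tag_map : List String) (out : List String) : Decidable (Spec_reconstruct_entities_from_iob tokens ner_tag_ids tag_map out) := by unfold Spec_reconstruct_entities_from_iob; infer_instance

-- ===== CLAIM (what is proved, stated in full; the proofs are below) =====
def Claim_equal_reconstruct_entities_from_iob : Prop := ∀ (tokens : List String) (ner_tag_ids : List Int) (tag_map : List String), Dom_reconstruct_entities_from_iob tokens ner_tag_ids tag_map → Pre_reconstruct_entities_from_iob tokens ner_tag_ids tag_map → Spec_reconstruct_entities_from_iob tokens ner_tag_ids tag_map (reconstruct_entities_from_iob tokens ner_tag_ids tag_map)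

-- ===== LEMMAS AND PROOFS =====

theorem pvBnotI (s : String) (h : PySem.Str.startswith s "B-" = true) :
    PySem.Str.startswith s "I-" = false := by
  simp only [PySem.Str.startswith_eq, PySem.Chars.startswith_iff] at *
  by_contra hc
  simp only [Bool.not_eq_false] at hc
  rw [PySem.Chars.startswith_iff] at hc
  obtain ⟨t1, h1⟩ := h
  obtain ⟨t2, h2⟩ := hc
  rw [← h1] at h2
  have hI : "I-".toList = ['I','-'] := by decide
  have hB : "B-".toList = ['B','-'] := by decide
  rw [hI, hB] at h2
  simp at h2

def pvFinalA (st : List String × List String × Option String) : List String :=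
  if st.2.1 ≠ [] then st.1 ++ [pvFmtA st.2.2 st.2.1] else st.1

theorem pvMain (qs : List (String × String)) :
    (∀ out, pvFinalA (qs.foldl (fun st q => pvBodyA st q.1 q.2) (out, [], none)) = out ++ pvGoB qs) ∧
    (∀ out l cur, cur ≠ [] →
      pvFinalA (qs.foldl (fun st q => pvBodyA st q.1 q.2) (out, cur, some l)) =
      out ++ (l ++ ": " ++ PySem.Str.join " " (cur ++ (qs.takeWhile (pvSpanIB l)).map Prod.fst))
        :: pvGoB (qs.dropWhile (pvSpanIB l))) := by
  induction qs with
  | nil =>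
    constructor
    · intro out; simp [pvFinalA, pvGoB]
    · intro out l cur hcur; simp [pvFinalA, pvGoB, pvFmtA, hcur]
  | cons q qs ih =>
    obtain ⟨ihc, iho⟩ := ih
    constructor
    · intro out
      by_cases hB : PySem.Str.startswith q.2 "B-" = true
      · have hB2 : PySem.Chars.startswith q.2.toList ['B','-'] = true := by simpa using hB
        rw [List.foldl_cons]
        have hstep : pvBodyA (out, [], none) q.1 q.2 =
            (out, [q.1], some (PySem.Str.slice q.2 (some 2) none)) := by
          simp [pvBodyA, hB2]
        rw [hstep, iho out _ [q.1] (by simp)]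
        rw [pvGoB]
        simp [hB2]
      · have hB2 : PySem.Chars.startswith q.2.toList ['B','-'] = false := by simpa using hB
        rw [List.foldl_cons]
        have hstep : pvBodyA (out, [], none) q.1 q.2 = (out, [], none) := by
          simp only [pvBodyA]
          split_ifs <;> simp_all
        rw [hstep, ihc out, pvGoB]
        simp [hB2]
    · intro out l cur hcur
      by_cases hB : PySem.Str.startswith q.2 "B-" = true
      · have hB2 : PySem.Chars.startswith q.2.toList ['B','-'] = true := by simpa using hB
        have hI2 : PySem.Chars.startswith q.2.toList ['I','-'] = false := by
          simpa using pvBnotI q.2 hB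
        rw [List.foldl_cons]
        have hstep : pvBodyA (out, cur, some l) q.1 q.2 =
            (out ++ [pvFmtA (some l) cur], [q.1], some (PySem.Str.slice q.2 (some 2) none)) := by
          simp [pvBodyA, hB2, hcur]
        rw [hstep, iho _ _ [q.1] (by simp)]
        have hpI : pvSpanIB l q = false := by simp [pvSpanIB, hI2]
        rw [List.takeWhile_cons_of_neg (by simp [hpI]), List.dropWhile_cons_of_neg (by simp [hpI])]
        rw [pvGoB]
        simp [hB2, pvFmtA]
      · have hB2 : PySem.Chars.startswith q.2.toList ['B','-'] = false := by simpa using hB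
        by_cases hpI : pvSpanIB l q = true
        · have hI2 : PySem.Chars.startswith q.2.toList ['I','-'] = true := by
            have := hpI; simp [pvSpanIB] at this; simpa using this.1
          have hsl : l = PySem.Str.slice q.2 (some 2) none := by
            have := hpI; simp [pvSpanIB] at this; exact this.2.symm
          rw [List.foldl_cons]
          have hstep : pvBodyA (out, cur, some l) q.1 q.2 = (out, cur ++ [q.1], some l) := by
            simp [pvBodyA, hB2, hI2, ← hsl]
          rw [hstep, iho _ _ _ (by simp)]
          rw [List.takeWhile_cons_of_pos hpI, List.dropWhile_cons_of_pos hpI]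
          simp
        · simp only [Bool.not_eq_true] at hpI
          rw [List.foldl_cons]
          have hstep : pvBodyA (out, cur, some l) q.1 q.2 =
              (out ++ [pvFmtA (some l) cur], [], none) := by
            by_cases hI : PySem.Chars.startswith q.2.toList ['I','-'] = true
            · have hsl : ¬ (l = PySem.Str.slice q.2 (some 2) none) := by
                intro he
                rw [pvSpanIB] at hpI
                simp [hI, ← he] at hpI
              simp [pvBodyA, hB2, hI, hcur, hsl]
            · simp only [Bool.not_eq_true] at hI
              simp [pvBodyA, hB2, hI, hcur]
          rw [hstep, ihc]
          rw [List.takeWhile_cons_of_neg (by simp [hpI]), List.dropWhile_cons_of_neg (by simp [hpI])]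
          rw [pvGoB]
          simp [hB2, pvFmtA]

theorem pvFoldEq (tokens : List String) (ner_tag_ids : List Int) (tag_map : List String) :
    (tokens.zip ner_tag_ids).foldl (pvStepA tag_map) ([], [], none) =
    (pvPairsB tokens ner_tag_ids tag_map).foldl (fun st q => pvBodyA st q.1 q.2) ([], [], none) := by
  rw [pvPairsB, List.foldl_map]
  rfl

-- ===== VERDICT (by name: the statement is the Claim_ definition above) =====
theorem reconstruct_entities_from_iob_spec : Claim_equal_reconstruct_entities_from_iob := by
  intro tokens ner_tag_ids tag_map _ _
  unfold Spec_reconstruct_entities_from_iob reconstruct_entities_from_iob reconstruct_entities_from_iob_alt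
  rw [pvFoldEq]
  exact (pvMain (pvPairsB tokens ner_tag_ids tag_map)).1 []
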